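-- pv_equiv track=rewrite | github.com/boisvert4427/youtube-videos | video_generator/tennis/generate_atp_shorts_timeline_moviepy.py | _extract_result_parts
-- ===== SOURCE A (Python) =====
-- def _extract_result_parts(line: str) -> tuple[str, str, str]:
--     text = line.strip()
--     if not text:
--         return ("", "", "")
--     tokens = text.split()
--     rnd = tokens[0] if tokens else ""
--     valid_rounds = {"R128", "R64", "R32", "R16", "QF", "SF", "F"}
--     if rnd not in valid_rounds:
--         return ("", text, "")
--     rest = " ".join(tokens[1:]).strip()
--     if not rest:
--         return (rnd, "-", "")
--
--     parts = rest.split()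
--     score_parts: list[str] = []
--     while parts:
--         token = parts[-1]
--         if any(ch.isdigit() for ch in token) or "-" in token:
--             score_parts.insert(0, parts.pop())
--         else:
--             break
--     opponent = " ".join(parts).strip() or "-"
--     score = " ".join(score_parts).strip()
--     return (rnd, opponent, score)
-- ===== SOURCE B (Python) =====
-- def _is_scoreish(token):
--     return any(ch.isdigit() or ch == "-" for ch in token)
--
--
-- def _split_opp_score(tokens):
--     # One forward pass: the score is the maximal suffix of score-like
--     # tokens, so remember where the last non-score-like token ends.
--     split = 0
--     pos = 0
--     for tok in tokens:
--         pos += 1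
--         if not _is_scoreish(tok):
--             split = pos
--     return tokens[:split], tokens[split:]
--
--
-- def _extract_result_parts(line: str) -> tuple[str, str, str]:
--     tokens = line.split()
--     if not tokens:
--         return ("", "", "")
--     if tokens[0] not in ("R128", "R64", "R32", "R16", "QF", "SF", "F"):
--         return ("", line.strip(), "")
--     rnd, rest = tokens[0], tokens[1:]
--     if not rest:
--         return (rnd, "-", "")
--     opp, score = _split_opp_score(rest)
--     return (rnd, " ".join(opp) if opp else "-", " ".join(score))
-- ===== Notes on version B (the rewrite author's own statement) =====
-- stated objective: alternative
-- what changed: B splits the line into tokens once and finds the opponent/score boundary in one forward pass that records where the last non-score-like token ends, then slices; A instead re-joins, re-strips and re-splits the rest string and peels score tokens off its tail with a backward while-loop of pop/insert(0); B also tests the dash per character instead of a substring search.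
import Mathlib
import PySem

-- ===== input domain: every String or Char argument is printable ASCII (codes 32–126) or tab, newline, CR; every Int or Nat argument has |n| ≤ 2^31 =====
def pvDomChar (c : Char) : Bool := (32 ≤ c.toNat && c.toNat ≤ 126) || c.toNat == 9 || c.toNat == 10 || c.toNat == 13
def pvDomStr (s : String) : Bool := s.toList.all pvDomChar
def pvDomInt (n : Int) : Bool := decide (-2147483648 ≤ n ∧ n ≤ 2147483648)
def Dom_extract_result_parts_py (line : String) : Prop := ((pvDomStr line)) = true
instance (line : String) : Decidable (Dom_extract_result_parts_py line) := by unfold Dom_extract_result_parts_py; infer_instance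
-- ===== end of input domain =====

-- B replaces A's backward pop/insert(0) peel over a re-joined, re-stripped, re-split rest
-- string by one forward pass over the token list that computes the opponent/score boundary,
-- never rebuilding intermediate strings (objective: alternative decomposition).

-- ===== PORT A =====
-- any(ch.isdigit() for ch in token) or "-" in token
def pvScoreLike (t : String) : Bool :=
  t.toList.any PySem.Chars.isdigit || PySem.Str.isIn "-" t

-- the 'while parts: … parts.pop() / score_parts.insert(0, …) … else break' loop of A
def peelA (parts score : List String) : List String × List String :=
  if hne : parts = [] then (parts, score)
  else
    let token := parts.getLast hne      -- parts[-1]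
    if pvScoreLike token then peelA parts.dropLast (token :: score)
    else (parts, score)
termination_by parts.length
decreasing_by
  simp [List.length_dropLast]
  exact List.length_pos_iff.mpr hne

def extract_result_parts_py (line : String) : String × String × String :=
  let text := PySem.Str.strip line
  if text = "" then ("", "", "")
  else
    let tokens := PySem.Str.split₀ text
    let rnd := tokens.headD ""          -- tokens[0] if tokens else ""
    if rnd ∈ (["R128", "R64", "R32", "R16", "QF", "SF", "F"] : List String) then
      let rest := PySem.Str.strip (PySem.Str.join " " (tokens.drop 1))
      if rest = "" then (rnd, "-", "")
      else
        let parts := PySem.Str.split₀ rest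
        let pr := peelA parts []
        let opp0 := PySem.Str.strip (PySem.Str.join " " pr.1)
        let opponent := if opp0 = "" then "-" else opp0
        let score := PySem.Str.strip (PySem.Str.join " " pr.2)
        (rnd, opponent, score)
    else ("", text, "")

-- ===== PORT B =====
-- any(ch.isdigit() or ch == "-" for ch in token)
def pvScoreish (t : String) : Bool :=
  t.toList.any (fun ch => PySem.Chars.isdigit ch || ch == '-')

-- _split_opp_score: one forward pass tracking (split, pos), then two slices
def pvSplitOppScore (tokens : List String) : List String × List String :=
  let st := tokens.foldl
    (fun (st : Int × Int) tok =>
      (if pvScoreish tok = true then st.1 else st.2 + 1, st.2 + 1)) (0, 0)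
  (PySem.List.slice tokens none (some st.1), PySem.List.slice tokens (some st.1) none)

def extract_result_parts_py_alt (line : String) : String × String × String :=
  match PySem.Str.split₀ line with
  | [] => ("", "", "")
  | rnd :: rest =>
      if rnd ∉ (["R128", "R64", "R32", "R16", "QF", "SF", "F"] : List String) then
        ("", PySem.Str.strip line, "")
      else
        match rest with
        | [] => (rnd, "-", "")
        | _ :: _ =>
            let os := pvSplitOppScore rest
            (rnd,
             if os.1 = [] then "-" else PySem.Str.join " " os.1,
             PySem.Str.join " " os.2)

-- ===== PRECONDITION & SPEC =====
def Spec_extract_result_parts_py (line : String) (out : String × String × String) : Prop := out = extract_result_parts_py_alt line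
instance (line : String) (out : String × String × String) : Decidable (Spec_extract_result_parts_py line out) := by unfold Spec_extract_result_parts_py; infer_instance

-- ===== CLAIM (what is proved, stated in full; the proofs are below) =====
def Claim_equal_extract_result_parts_py : Prop := ∀ (line : String), Dom_extract_result_parts_py line → Spec_extract_result_parts_py line (extract_result_parts_py line)

-- ===== LEMMAS AND PROOFS =====

theorem pvHead_dropWhile {α : Type} (p : α → Bool) (s t : List α) (c : α)
    (h : List.dropWhile p s = c :: t) : p c = false := by
  have hne : List.dropWhile p s ≠ [] := by simp [h]
  have := List.head_dropWhile_not p (l := s) hne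
  simpa [h] using this
def pvP (c : Char) : Bool := !PySem.Chars.isspace c
def pvWords (s : List Char) : List (List Char) :=
  match h : s.dropWhile PySem.Chars.isspace with
  | [] => []
  | c :: t => (c :: t).takeWhile pvP :: pvWords ((c :: t).dropWhile pvP)
termination_by s.length
decreasing_by
  have hc : PySem.Chars.isspace c = false := pvHead_dropWhile _ _ _ _ h
  have h1 : ((c :: t).dropWhile pvP).length ≤ t.length := by
    simp [pvP, hc]
    exact List.length_dropWhile_le _ _
  have h2 : (c :: t).length ≤ s.length := by
    rw [← h]; exact List.length_dropWhile_le _ _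
  simp at h2
  omega

theorem pvWords_eq_nil (s : List Char) (hd : s.dropWhile PySem.Chars.isspace = []) :
    pvWords s = [] := by
  rw [pvWords]
  split
  · rfl
  · rename_i c t h; rw [hd] at h; cases h

theorem pvWords_eq_cons (s : List Char) (c : Char) (t : List Char)
    (hd : s.dropWhile PySem.Chars.isspace = c :: t) :
    pvWords s = (c :: t).takeWhile pvP :: pvWords ((c :: t).dropWhile pvP) := by
  rw [pvWords]
  split
  · rename_i h; rw [hd] at h; cases h
  · rename_i c' t' h; rw [hd] at h; cases h; rfl

theorem pvWords_nil : pvWords [] = [] := pvWords_eq_nil [] rfl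

theorem pvWords_cons_space (c : Char) (s : List Char) (h : PySem.Chars.isspace c = true) :
    pvWords (c :: s) = pvWords s := by
  have e : (c :: s).dropWhile PySem.Chars.isspace = s.dropWhile PySem.Chars.isspace :=
    List.dropWhile_cons_of_pos h
  cases hd : s.dropWhile PySem.Chars.isspace with
  | nil => rw [pvWords_eq_nil _ (e.trans hd), pvWords_eq_nil _ hd]
  | cons a t => rw [pvWords_eq_cons _ _ _ (e.trans hd), pvWords_eq_cons _ _ _ hd]

theorem pvWords_cons_nonspace (c : Char) (s : List Char) (h : PySem.Chars.isspace c = false) :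
    pvWords (c :: s) = (c :: s).takeWhile pvP :: pvWords ((c :: s).dropWhile pvP) :=
  pvWords_eq_cons _ _ _ (List.dropWhile_cons_of_neg (by simp [h]))

theorem pvGo_spec (s : List Char) : ∀ cur acc,
    PySem.Chars.split₀.go s cur acc =
      acc.reverse ++
        (if cur = [] then pvWords s
         else (cur.reverse ++ s.takeWhile pvP) :: pvWords (s.dropWhile pvP)) := by
  induction s with
  | nil =>
    intro cur acc
    rw [PySem.Chars.split₀.go]
    cases cur <;> simp [pvWords_nil]
  | cons c rest ih =>
    intro cur acc
    rw [PySem.Chars.split₀.go]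
    by_cases hsp : PySem.Chars.isspace c = true
    · rw [if_pos hsp]
      have hpc : pvP c = false := by simp [pvP, hsp]
      cases cur with
      | nil => simp [ih, pvWords_cons_space c rest hsp]
      | cons a b =>
        rw [show ((a :: b : List Char).isEmpty) = false from rfl,
          if_neg Bool.false_ne_true, ih [] ((a :: b).reverse :: acc),
          List.takeWhile_cons_of_neg (p := pvP) (by simp [hpc]),
          List.dropWhile_cons_of_neg (p := pvP) (by simp [hpc]),
          pvWords_cons_space c rest hsp]
        simp
    · have hsp' : PySem.Chars.isspace c = false := by simpa using hsp
      rw [if_neg hsp]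
      rw [ih (c :: cur) acc]
      have hpc : pvP c = true := by simp [pvP, hsp']
      cases cur with
      | nil =>
        simp [pvWords_cons_nonspace c rest hsp', List.takeWhile_cons_of_pos hpc,
          List.dropWhile_cons_of_pos hpc]
      | cons a b =>
        simp [List.takeWhile_cons_of_pos hpc, List.dropWhile_cons_of_pos hpc]

theorem pvSplit₀_eq_pvWords (s : List Char) : PySem.Chars.split₀ s = pvWords s := by
  simpa using pvGo_spec s [] []

theorem pvWords_lstrip (s : List Char) :
    pvWords (s.dropWhile PySem.Chars.isspace) = pvWords s := by
  cases hd : s.dropWhile PySem.Chars.isspace with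
  | nil => rw [pvWords_eq_nil _ hd, pvWords_eq_nil _ (by simp)]
  | cons c t =>
    have hc : PySem.Chars.isspace c = false := pvHead_dropWhile _ _ _ _ hd
    rw [pvWords_eq_cons s c t hd,
      pvWords_eq_cons (c :: t) c t (List.dropWhile_cons_of_neg (by simp [hc]))]

theorem pvWords_words_aux : ∀ (n : Nat) (s : List Char), s.length ≤ n →
    ∀ w ∈ pvWords s, w ≠ [] ∧ ∀ c ∈ w, PySem.Chars.isspace c = false := by
  intro n
  induction n with
  | zero =>
    intro s hlen w hw
    have : s = [] := by cases s <;> simp_all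
    subst this
    rw [pvWords_nil] at hw
    cases hw
  | succ n ih =>
    intro s hlen w hw
    cases hd : s.dropWhile PySem.Chars.isspace with
    | nil => rw [pvWords_eq_nil s hd] at hw; cases hw
    | cons c t =>
      rw [pvWords_eq_cons s c t hd] at hw
      have hc : PySem.Chars.isspace c = false := pvHead_dropWhile _ _ _ _ hd
      have hpc : pvP c = true := by simp [pvP, hc]
      have hlt : (c :: t).length ≤ s.length := by
        rw [← hd]; exact List.length_dropWhile_le _ _
      rcases List.mem_cons.mp hw with h | h
      · subst h
        refine ⟨by simp [List.takeWhile_cons_of_pos hpc], ?_⟩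
        intro d hdmem
        have := List.mem_takeWhile_imp hdmem
        simpa [pvP] using this
      · refine ih ((c :: t).dropWhile pvP) ?_ w h
        rw [List.dropWhile_cons_of_pos hpc]
        have := List.length_dropWhile_le pvP t
        simp at hlt
        omega

theorem pvWords_words (s : List Char) :
    ∀ w ∈ pvWords s, w ≠ [] ∧ ∀ c ∈ w, PySem.Chars.isspace c = false :=
  pvWords_words_aux s.length s le_rfl

theorem pvDropWhile_spaces (sp : List Char) (hsp : ∀ c ∈ sp, PySem.Chars.isspace c = true) :
    sp.dropWhile pvP = sp := by
  cases sp with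
  | nil => rfl
  | cons a b => exact List.dropWhile_cons_of_neg (by simp [pvP, hsp a (by simp)])

theorem pvTakeWhile_spaces (sp : List Char) (hsp : ∀ c ∈ sp, PySem.Chars.isspace c = true) :
    sp.takeWhile pvP = [] := by
  cases sp with
  | nil => rfl
  | cons a b => exact List.takeWhile_cons_of_neg (by simp [pvP, hsp a (by simp)])

theorem pvWords_spaces (sp : List Char) (hsp : ∀ c ∈ sp, PySem.Chars.isspace c = true) :
    pvWords sp = [] :=
  pvWords_eq_nil sp (List.dropWhile_eq_nil_iff.mpr (by intro c hc; exact hsp c hc))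

theorem pvWords_append_spaces_aux : ∀ (n : Nat) (s sp : List Char), s.length ≤ n →
    (∀ c ∈ sp, PySem.Chars.isspace c = true) → pvWords (s ++ sp) = pvWords s := by
  intro n
  induction n with
  | zero =>
    intro s sp hlen hsp
    have : s = [] := by cases s <;> simp_all
    subst this
    simpa [pvWords_nil] using pvWords_spaces sp hsp
  | succ n ih =>
    intro s sp hlen hsp
    cases hd : s.dropWhile PySem.Chars.isspace with
    | nil =>
      rw [pvWords_eq_nil s hd]
      apply pvWords_eq_nil
      rw [List.dropWhile_append, hd]
      simpa using List.dropWhile_eq_nil_iff.mpr (by intro c hc; exact hsp c hc)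
    | cons c t =>
      have hc : PySem.Chars.isspace c = false := pvHead_dropWhile _ _ _ _ hd
      have hpc : pvP c = true := by simp [pvP, hc]
      have hda : (s ++ sp).dropWhile PySem.Chars.isspace = (c :: t) ++ sp := by
        rw [List.dropWhile_append, hd]; simp
      rw [pvWords_eq_cons (s ++ sp) c (t ++ sp) (by simpa using hda),
        pvWords_eq_cons s c t hd]
      have hlt : (c :: t).length ≤ s.length := by
        rw [← hd]; exact List.length_dropWhile_le _ _
      congr 1
      · rw [show (c :: (t ++ sp)) = (c :: t) ++ sp by simp, List.takeWhile_append]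
        split
        · rename_i hfull
          have : (c :: t).takeWhile pvP = c :: t :=
            (List.takeWhile_sublist _).eq_of_length (by simpa using hfull)
          rw [pvTakeWhile_spaces sp hsp, this]
          simp
        · rfl
      · rw [show (c :: (t ++ sp)) = (c :: t) ++ sp by simp, List.dropWhile_append]
        split
        · rename_i hempty
          rw [pvDropWhile_spaces sp hsp, pvWords_spaces sp hsp]
          simp at hempty
          have hnil : (c :: t).dropWhile pvP = [] := by
            apply List.dropWhile_eq_nil_iff.mpr
            intro a ha
            rcases List.mem_cons.mp ha with h | h
            · subst h; exact hempty.1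
            · exact hempty.2 a h
          rw [hnil, pvWords_nil]
        · apply ih
          · rw [List.dropWhile_cons_of_pos hpc]
            have := List.length_dropWhile_le pvP t
            simp at hlt
            omega
          · exact hsp

theorem pvWords_append_spaces (s sp : List Char) (hsp : ∀ c ∈ sp, PySem.Chars.isspace c = true) :
    pvWords (s ++ sp) = pvWords s :=
  pvWords_append_spaces_aux s.length s sp le_rfl hsp

theorem pvRstrip_decomp (y : List Char) :
    PySem.Chars.rstrip y ++ (y.reverse.takeWhile PySem.Chars.isspace).reverse = y := by
  unfold PySem.Chars.rstrip
  rw [← List.reverse_append, List.takeWhile_append_dropWhile, List.reverse_reverse]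

theorem pvWords_strip (s : List Char) : pvWords (PySem.Chars.strip s) = pvWords s := by
  unfold PySem.Chars.strip PySem.Chars.lstrip
  set y := s.dropWhile PySem.Chars.isspace with hy
  have hsp : ∀ c ∈ (y.reverse.takeWhile PySem.Chars.isspace).reverse, PySem.Chars.isspace c = true := by
    intro c hc
    exact List.mem_takeWhile_imp (List.mem_reverse.mp hc)
  calc pvWords (PySem.Chars.rstrip y)
      = pvWords (PySem.Chars.rstrip y ++ (y.reverse.takeWhile PySem.Chars.isspace).reverse) :=
        (pvWords_append_spaces _ _ hsp).symm
    _ = pvWords y := by rw [pvRstrip_decomp]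
    _ = pvWords s := pvWords_lstrip s

theorem pvStrip_eq_nil_iff (s : List Char) :
    PySem.Chars.strip s = [] ↔ s.dropWhile PySem.Chars.isspace = [] := by
  unfold PySem.Chars.strip PySem.Chars.lstrip PySem.Chars.rstrip
  constructor
  · intro h
    simp only [List.reverse_eq_nil_iff, List.dropWhile_eq_nil_iff] at h
    cases hd : s.dropWhile PySem.Chars.isspace with
    | nil => rfl
    | cons c t =>
      have hc : PySem.Chars.isspace c = false := pvHead_dropWhile _ _ _ _ hd
      have : PySem.Chars.isspace c = true := by
        apply h
        rw [hd]
        simp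
      rw [hc] at this
      cases this
  · intro h
    rw [h]
    rfl

def pvWordy (ws : List (List Char)) : Prop :=
  ∀ w ∈ ws, w ≠ [] ∧ ∀ c ∈ w, PySem.Chars.isspace c = false

theorem pvJoin_eq_nil_iff (ws : List (List Char)) (h : pvWordy ws) :
    PySem.Chars.join [' '] ws = [] ↔ ws = [] := by
  cases ws with
  | nil => simp [PySem.Chars.join_nil]
  | cons w ws' =>
    have hw : w ≠ [] := (h w (by simp)).1
    cases ws' with
    | nil => simp [PySem.Chars.join_singleton, hw]
    | cons v vs => simp [PySem.Chars.join_cons_cons, hw]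

theorem pvJoin_last (ws : List (List Char)) (h : pvWordy ws) (hne : ws ≠ []) :
    ∃ pre d, PySem.Chars.join [' '] ws = pre ++ [d] ∧ PySem.Chars.isspace d = false := by
  induction ws with
  | nil => exact absurd rfl hne
  | cons w ws' ih =>
    cases ws' with
    | nil =>
      have hw : w ≠ [] := (h w (by simp)).1
      refine ⟨w.dropLast, w.getLast hw, ?_, (h w (by simp)).2 _ (List.getLast_mem hw)⟩
      rw [PySem.Chars.join_singleton, List.dropLast_append_getLast hw]
    | cons v vs =>
      obtain ⟨pre, d, hj, hd⟩ := ih (fun u hu => h u (by simp [hu])) (by simp)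
      refine ⟨w ++ [' '] ++ pre, d, ?_, hd⟩
      rw [PySem.Chars.join_cons_cons, hj]
      simp

theorem pvStrip_join (ws : List (List Char)) (h : pvWordy ws) :
    PySem.Chars.strip (PySem.Chars.join [' '] ws) = PySem.Chars.join [' '] ws := by
  cases ws with
  | nil => rw [PySem.Chars.join_nil]; rfl
  | cons w ws' =>
    obtain ⟨pre, d, hj, hd⟩ := pvJoin_last (w :: ws') h (by simp)
    have hw : w ≠ [] := (h w (by simp)).1
    obtain ⟨c, t, hct⟩ : ∃ c t, w = c :: t := by
      cases w with
      | nil => exact absurd rfl hw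
      | cons c t => exact ⟨c, t, rfl⟩
    have hc : PySem.Chars.isspace c = false := (h w (by simp)).2 c (by simp [hct])
    have hhead : ∃ r, PySem.Chars.join [' '] (w :: ws') = c :: r := by
      cases ws' with
      | nil => exact ⟨t, by rw [PySem.Chars.join_singleton, hct]⟩
      | cons v vs =>
        exact ⟨t ++ [' '] ++ PySem.Chars.join [' '] (v :: vs),
          by rw [PySem.Chars.join_cons_cons, hct]; simp⟩
    obtain ⟨r, hr⟩ := hhead
    unfold PySem.Chars.strip PySem.Chars.lstrip PySem.Chars.rstrip
    rw [hr, List.dropWhile_cons_of_neg (by simp [hc]), ← hr, hj]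
    rw [List.reverse_append, List.reverse_singleton, List.singleton_append,
      List.dropWhile_cons_of_neg (by simp [hd])]
    simp

theorem pvWords_join (ws : List (List Char)) (h : pvWordy ws) :
    pvWords (PySem.Chars.join [' '] ws) = ws := by
  induction ws with
  | nil => rw [PySem.Chars.join_nil, pvWords_nil]
  | cons w ws' ih =>
    have hw : w ≠ [] := (h w (by simp)).1
    have hwall : ∀ c ∈ w, PySem.Chars.isspace c = false := (h w (by simp)).2
    obtain ⟨c, t, hct⟩ : ∃ c t, w = c :: t := by
      cases w with
      | nil => exact absurd rfl hw
      | cons c t => exact ⟨c, t, rfl⟩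
    subst hct
    have hc : PySem.Chars.isspace c = false := hwall c (by simp)
    have hwfullT : (c :: t).takeWhile pvP = c :: t :=
      List.takeWhile_eq_self_iff.mpr (by intro a ha; simp [pvP, hwall a ha])
    have hwfullD : (c :: t).dropWhile pvP = [] :=
      List.dropWhile_eq_nil_iff.mpr (by intro a ha; simp [pvP, hwall a ha])
    have hsp : PySem.Chars.isspace ' ' = true := by decide
    obtain ⟨r, hjoin, hr⟩ : ∃ r, PySem.Chars.join [' '] ((c :: t) :: ws') = (c :: t) ++ r ∧
        (r = [] ∧ ws' = [] ∨ (r = ' ' :: PySem.Chars.join [' '] ws' ∧ ws' ≠ [])) := by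
      cases ws' with
      | nil => exact ⟨[], by rw [PySem.Chars.join_singleton]; simp, Or.inl ⟨rfl, rfl⟩⟩
      | cons v vs =>
        exact ⟨' ' :: PySem.Chars.join [' '] (v :: vs),
          by rw [PySem.Chars.join_cons_cons]; simp, Or.inr ⟨rfl, by simp⟩⟩
    have hrsp : r.takeWhile pvP = [] := by
      rcases hr with ⟨h1, _⟩ | ⟨h1, _⟩
      · rw [h1]; rfl
      · rw [h1]; exact List.takeWhile_cons_of_neg (by simp [pvP, hsp])
    rw [hjoin, show (c :: t) ++ r = c :: (t ++ r) by simp,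
      pvWords_eq_cons (c :: (t ++ r)) c (t ++ r)
        (List.dropWhile_cons_of_neg (by simp [hc]))]
    congr 1
    · rw [show c :: (t ++ r) = (c :: t) ++ r by simp, List.takeWhile_append, hwfullT]
      simp [hrsp]
    · rw [show c :: (t ++ r) = (c :: t) ++ r by simp, List.dropWhile_append, hwfullD]
      simp only [List.isEmpty_nil, if_pos]
      rcases hr with ⟨h1, h2⟩ | ⟨h1, _⟩
      · subst h1; subst h2; exact pvWords_nil
      · rw [h1, List.dropWhile_cons_of_neg (by simp [pvP, hsp]),
          pvWords_cons_space _ _ hsp]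
        exact ih (fun u hu => h u (by simp [hu]))

def pvM (xs : List String) : Nat := (xs.reverse.takeWhile pvScoreLike).length
theorem pvM_le (xs : List String) : pvM xs ≤ xs.length := by
  have := List.takeWhile_sublist (l := xs.reverse) (p := pvScoreLike)
  simpa [pvM] using this.length_le

theorem pvScoreish_eq (t : String) : pvScoreish t = pvScoreLike t := by
  unfold pvScoreish pvScoreLike
  rw [Bool.eq_iff_iff]
  simp only [List.any_eq_true, Bool.or_eq_true, beq_iff_eq, PySem.Str.isIn]
  have : PySem.Chars.isIn "-".toList t.toList = true ↔ '-' ∈ t.toList := by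
    rw [PySem.Chars.isIn_iff_infix]
    show ['-'] <:+: t.toList ↔ _
    exact List.singleton_infix_iff _ _
  constructor
  · rintro ⟨c, hc, hd | he⟩
    · exact Or.inl ⟨c, hc, hd⟩
    · exact Or.inr (this.mpr (he ▸ hc))
  · rintro (⟨c, hc, hd⟩ | hm)
    · exact ⟨c, hc, Or.inl hd⟩
    · exact ⟨'-', this.mp hm, Or.inr rfl⟩

theorem pvM_concat_pos (xs : List String) (t : String) (h : pvScoreLike t = true) :
    pvM (xs ++ [t]) = pvM xs + 1 := by
  simp [pvM, List.reverse_append, h]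

theorem pvM_concat_neg (xs : List String) (t : String) (h : pvScoreLike t = false) :
    pvM (xs ++ [t]) = 0 := by
  simp [pvM, List.reverse_append, h]

theorem pvFold_spec (xs : List String) :
    xs.foldl (fun (st : Int × Int) tok =>
        (if pvScoreish tok = true then st.1 else st.2 + 1, st.2 + 1)) (0, 0)
      = (((xs.length - pvM xs : Nat) : Int), (xs.length : Int)) := by
  induction xs using List.reverseRecOn with
  | nil => simp [pvM]
  | append_singleton xs t ih =>
    rw [List.foldl_append, ih]
    simp only [List.foldl_cons, List.foldl_nil]
    have hle := pvM_le xs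
    by_cases h : pvScoreish t = true
    · rw [if_pos h, pvM_concat_pos xs t (by rw [← pvScoreish_eq]; exact h)]
      have h1 : (xs ++ [t]).length - (pvM xs + 1) = xs.length - pvM xs := by
        simp only [List.length_append, List.length_cons, List.length_nil]
        omega
      rw [h1]
      simp
    · rw [if_neg h, pvM_concat_neg xs t (by rw [← pvScoreish_eq]; simpa using h)]
      have h1 : (xs ++ [t]).length - 0 = xs.length + 1 := by simp
      rw [h1]
      push_cast
      simp

theorem pvSplitOppScore_spec (xs : List String) :
    pvSplitOppScore xs = (xs.take (xs.length - pvM xs), xs.drop (xs.length - pvM xs)) := by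
  rw [pvSplitOppScore]
  simp only [pvFold_spec]
  rw [PySem.List.slice_to _ (by positivity), PySem.List.slice_from _ (by positivity)]
  simp

theorem pvWords_eq_nil_iff (s : List Char) :
    pvWords s = [] ↔ s.dropWhile PySem.Chars.isspace = [] := by
  constructor
  · intro h
    cases hd : s.dropWhile PySem.Chars.isspace with
    | nil => rfl
    | cons c t => rw [pvWords_eq_cons s c t hd] at h; cases h
  · exact pvWords_eq_nil s

theorem pvOfList_eq_empty (l : List Char) : String.ofList l = "" ↔ l = [] := by
  constructor
  · intro h
    have := congrArg String.toList h
    simpa [String.toList_ofList] using this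
  · intro h; rw [h]

theorem peelA_spec (xs : List String) : ∀ acc,
    peelA xs acc = (xs.take (xs.length - pvM xs), xs.drop (xs.length - pvM xs) ++ acc) := by
  induction xs using List.reverseRecOn with
  | nil => intro acc; rw [peelA]; simp [pvM]
  | append_singleton xs t ih =>
    intro acc
    rw [peelA]
    have hne : xs ++ [t] ≠ [] := by simp
    rw [dif_neg hne]
    simp only [List.getLast_concat, List.dropLast_concat]
    by_cases h : pvScoreLike t = true
    · rw [if_pos h, ih, pvM_concat_pos xs t h]
      have hm := pvM_le xs
      have h1 : xs.length + 1 - (pvM xs + 1) = xs.length - pvM xs := by omega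
      have h2 : xs.length - pvM xs ≤ xs.length := by omega
      rw [show (xs ++ [t]).length = xs.length + 1 by simp, h1,
        List.take_append_of_le_length h2, List.drop_append_of_le_length h2]
      simp
    · rw [if_neg h, pvM_concat_neg xs t (by simpa using h)]
      simp

theorem pvStrSplit (s : String) :
    PySem.Str.split₀ s = (pvWords s.toList).map String.ofList := by
  rw [PySem.Str.split₀, pvSplit₀_eq_pvWords]

theorem pvStripEmpty (s : String) :
    (PySem.Str.strip s = "") ↔ pvWords s.toList = [] := by
  rw [PySem.Str.strip, pvOfList_eq_empty, pvStrip_eq_nil_iff, ← pvWords_eq_nil_iff]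

theorem pvStrJoin (ps : List (List Char)) :
    PySem.Str.join " " (ps.map String.ofList) = String.ofList (PySem.Chars.join [' '] ps) := by
  rw [PySem.Str.join]
  congr 1
  rw [List.map_map]
  have h1 : " ".toList = [' '] := by decide
  have h2 : ps.map (String.toList ∘ String.ofList) = ps := by
    rw [show String.toList ∘ String.ofList = id from funext (fun x => by simp), List.map_id]
  rw [h1, h2]

theorem pvStripJoinStr (ps : List (List Char)) (h : pvWordy ps) :
    PySem.Str.strip (PySem.Str.join " " (ps.map String.ofList))
      = PySem.Str.join " " (ps.map String.ofList) := by
  rw [pvStrJoin, PySem.Str.strip, String.toList_ofList, pvStrip_join ps h]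

theorem pvJoinStrEmpty (ps : List (List Char)) (h : pvWordy ps) :
    (PySem.Str.join " " (ps.map String.ofList) = "") ↔ ps = [] := by
  rw [pvStrJoin, pvOfList_eq_empty, pvJoin_eq_nil_iff ps h]

theorem pvMainEq (line : String) :
    extract_result_parts_py line = extract_result_parts_py_alt line := by
  unfold extract_result_parts_py extract_result_parts_py_alt
  cases hw : pvWords line.toList with
  | nil =>
    have h1 : PySem.Str.strip line = "" := (pvStripEmpty line).mpr hw
    simp only [pvStrSplit, PySem.Str.toList_strip, pvWords_strip, hw, List.map_nil, if_pos h1]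
  | cons w ws =>
    have h1 : ¬ (PySem.Str.strip line = "") := by
      rw [pvStripEmpty, hw]; simp
    have hwordy : pvWordy (w :: ws) := by
      rw [← hw]; exact pvWords_words line.toList
    have hwordyT : pvWordy ws := fun u hu => hwordy u (by simp [hu])
    simp only [pvStrSplit, PySem.Str.toList_strip, pvWords_strip, hw, List.map_cons,
      if_neg h1, List.headD_cons, List.drop_succ_cons, List.drop_zero]
    by_cases hmem : String.ofList w ∈ (["R128", "R64", "R32", "R16", "QF", "SF", "F"] : List String)
    · rw [if_pos hmem, if_neg (not_not_intro hmem)]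
      cases ws with
      | nil =>
        rw [if_pos (by rw [pvStripJoinStr [] (fun u hu => absurd hu (List.not_mem_nil))]; rfl)]
        rfl
      | cons v vs =>
        have hrne : ¬ (PySem.Str.strip (PySem.Str.join " " ((v :: vs).map String.ofList)) = "") := by
          rw [pvStripJoinStr _ hwordyT, pvJoinStrEmpty _ hwordyT]
          simp
        rw [if_neg hrne]
        have hparts : (pvWords (PySem.Str.join " " ((v :: vs).map String.ofList)).toList).map String.ofList
            = (v :: vs).map String.ofList := by
          rw [pvStrJoin, String.toList_ofList, pvWords_join _ hwordyT]
        rw [hparts]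
        have hpeel := peelA_spec ((v :: vs).map String.ofList) []
        rw [List.append_nil] at hpeel
        rw [hpeel, pvSplitOppScore_spec]
        set k : Nat := (((v :: vs).map String.ofList).length - pvM ((v :: vs).map String.ofList)) with hk
        have htakeW : pvWordy ((v :: vs).take k) :=
          fun u hu => hwordyT u (List.mem_of_mem_take hu)
        have hdropW : pvWordy ((v :: vs).drop k) :=
          fun u hu => hwordyT u (List.mem_of_mem_drop hu)
        have htake : (((v :: vs).map String.ofList).take k)
            = ((v :: vs).take k).map String.ofList := by
          rw [← List.map_take]
        have hdrop : (((v :: vs).map String.ofList).drop k)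
            = ((v :: vs).drop k).map String.ofList := by
          rw [← List.map_drop]
        rw [htake, hdrop, pvStripJoinStr _ htakeW, pvStripJoinStr _ hdropW]
        by_cases hopp : (v :: vs).take k = []
        · rw [if_pos (by rw [(pvJoinStrEmpty _ htakeW)]; exact hopp), if_pos (by rw [hopp]; rfl)]
          rfl
        · rw [if_neg (by rw [(pvJoinStrEmpty _ htakeW)]; exact hopp),
            if_neg (by simpa using hopp)]
          rfl
    · rw [if_neg hmem, if_pos hmem]

-- ===== VERDICT (by name: the statement is the Claim_ definition above) =====
theorem extract_result_parts_py_spec : Claim_equal_extract_result_parts_py := by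
  intro line _
  unfold Spec_extract_result_parts_py
  exact pvMainEq line
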